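-- pv_equiv track=rewrite | github.com/mekaeli/ELE767_CODES | lab1/lanceur.py | _extract_bracket_groups
-- ===== SOURCE A (Python) =====
-- def _extract_bracket_groups(text: str) -> list[str]:
-- 	"""Extrait les groupes `[...]` de premier niveau d'une ligne.
--
-- 	Retourne les contenus sans les crochets externes.
-- 	"""
-- 	groups: list[str] = []
-- 	buf: list[str] = []
-- 	depth = 0
-- 	in_group = False
-- 	for ch in str(text or ""):
-- 		if ch == "[":
-- 			if depth == 0:
-- 				in_group = True
-- 				buf = []
-- 			else:
-- 				buf.append(ch)
-- 			depth += 1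
-- 		elif ch == "]":
-- 			if depth == 0:
-- 				continue
-- 			depth -= 1
-- 			if depth == 0 and in_group:
-- 				groups.append("".join(buf).strip())
-- 				in_group = False
-- 			else:
-- 				buf.append(ch)
-- 		else:
-- 			if in_group:
-- 				buf.append(ch)
-- 	return groups
-- ===== SOURCE B (Python) =====
-- def _extract_bracket_groups(text: str) -> list[str]:
-- 	"""Extrait les groupes `[...]` de premier niveau d'une ligne (version index/tranche)."""
-- 	s = str(text or "")
-- 	n = len(s)
-- 	groups: list[str] = []
-- 	i = 0
-- 	while i < n:
-- 		if s[i] == "[":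
-- 			depth = 1
-- 			j = i + 1
-- 			while j < n and depth:
-- 				if s[j] == "[":
-- 					depth += 1
-- 				elif s[j] == "]":
-- 					depth -= 1
-- 				j += 1
-- 			if depth == 0:
-- 				groups.append(s[i + 1:j - 1].strip())
-- 				i = j
-- 			else:
-- 				break
-- 		else:
-- 			i += 1
-- 	return groups
-- ===== Notes on version B (the rewrite author's own statement) =====
-- stated objective: alternative
-- what changed: Replaced the single for-loop with a character buffer and depth/in_group flags by an index-based outer scan plus an inner matching-bracket scan that slices each group s[i+1:j-1] directly from the string.
import Mathlib
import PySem

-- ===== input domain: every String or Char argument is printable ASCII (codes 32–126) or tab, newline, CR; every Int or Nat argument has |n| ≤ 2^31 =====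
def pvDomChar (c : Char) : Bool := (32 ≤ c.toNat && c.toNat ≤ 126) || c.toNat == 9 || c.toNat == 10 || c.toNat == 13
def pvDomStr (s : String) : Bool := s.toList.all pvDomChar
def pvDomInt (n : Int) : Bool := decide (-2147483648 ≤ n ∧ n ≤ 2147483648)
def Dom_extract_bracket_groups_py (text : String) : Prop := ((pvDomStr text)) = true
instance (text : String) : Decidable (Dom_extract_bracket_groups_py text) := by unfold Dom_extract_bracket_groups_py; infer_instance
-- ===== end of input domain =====

-- B replaces A's buffer-accumulating single loop by an index-based outer scan with an
-- inner matching-bracket scan that slices each group out of the string (objective: alternative).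

-- ===== PORT A =====
-- the for-loop of A, state (groups, buf, depth, in_group), one structural step per char
def aLoop (cs : List Char) (groups : List String) (buf : List Char) (depth : Int)
    (in_group : Bool) : List String :=
  match cs with
  | [] => groups
  | ch :: rest =>
    if ch = '[' then
      if depth = 0 then aLoop rest groups [] (depth + 1) true
      else aLoop rest groups (buf ++ [ch]) (depth + 1) in_group
    else if ch = ']' then
      if depth = 0 then aLoop rest groups buf depth in_group
      else
        if depth - 1 = 0 ∧ in_group = true then
          aLoop rest (groups ++ [PySem.Str.strip (String.ofList buf)]) buf (depth - 1) false
        else aLoop rest groups (buf ++ [ch]) (depth - 1) in_group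
    else
      if in_group then aLoop rest groups (buf ++ [ch]) depth in_group
      else aLoop rest groups buf depth in_group

def extract_bracket_groups_py (text : String) : List String :=
  -- str(text or "") : "" stays "", any other string is itself
  let s := if text = "" then "" else text
  aLoop s.toList [] [] 0 false

-- ===== PORT B =====
-- B's inner `while j < n and depth:` loop; `rest` is the part of the string from index j on
-- (`j < n` is `rest ≠ []`), so the loop is structural recursion on `rest`; returns (j, depth)
def bInner (rest : List Char) (j : Nat) (depth : Int) : Nat × Int :=
  match rest with
  | [] => (j, depth)
  | c :: rest' =>
    if depth ≠ 0 then
      if c = '[' then bInner rest' (j + 1) (depth + 1)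
      else if c = ']' then bInner rest' (j + 1) (depth - 1)
      else bInner rest' (j + 1) depth
    else (j, depth)

-- B's outer `while i < n:` loop; `fuel` only bounds the number of iterations (each one
-- advances i by at least 1, so `fuel = n` suffices) — a pure totality guard
def bOuter (cs : List Char) (fuel : Nat) (i : Nat) (groups : List String) : List String :=
  match fuel with
  | 0 => groups
  | fuel + 1 =>
    if h : i < cs.length then
      if cs[i]'h = '[' then
        let p := bInner (cs.drop (i + 1)) (i + 1) 1
        if p.2 = 0 then
          bOuter cs fuel p.1 (groups ++
            [PySem.Str.strip (String.ofList
              (PySem.List.slice cs (some ((i : Int) + 1)) (some ((p.1 : Int) - 1))))])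
        else groups
      else bOuter cs fuel (i + 1) groups
    else groups

def extract_bracket_groups_py_alt (text : String) : List String :=
  let s := if text = "" then "" else text
  bOuter s.toList s.toList.length 0 []

-- ===== PRECONDITION & SPEC =====
def Spec_extract_bracket_groups_py (text : String) (out : List String) : Prop := out = extract_bracket_groups_py_alt text
instance (text : String) (out : List String) : Decidable (Spec_extract_bracket_groups_py text out) := by unfold Spec_extract_bracket_groups_py; infer_instance

-- ===== CLAIM (what is proved, stated in full; the proofs are below) =====
def Claim_equal_extract_bracket_groups_py : Prop := ∀ (text : String), Dom_extract_bracket_groups_py text → Spec_extract_bracket_groups_py text (extract_bracket_groups_py text)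

-- ===== LEMMAS AND PROOFS =====

-- at depth 0 out of a group, A's leftover buffer is irrelevant
theorem aLoop_buf_irrel (cs : List Char) : ∀ (groups : List String) (buf buf' : List Char),
    aLoop cs groups buf 0 false = aLoop cs groups buf' 0 false := by
  induction cs with
  | nil => intros; rfl
  | cons ch rest ih =>
    intro groups buf buf'
    by_cases h1 : ch = '[' <;> by_cases h2 : ch = ']' <;>
      simp [aLoop, h1, h2] <;> apply ih

theorem bInner_ge (rest : List Char) : ∀ (j : Nat) (d : Int), j ≤ (bInner rest j d).1 := by
  induction rest with
  | nil => intro j d; simp [bInner]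
  | cons c rest' ih =>
    intro j d
    by_cases hd : d = 0
    · simp [bInner, hd]
    · by_cases h1 : c = '[' <;> by_cases h2 : c = ']' <;>
        simp [bInner, hd, h1, h2] <;> exact le_trans (by omega) (ih (j + 1) _)

theorem bInner_gt (rest : List Char) : ∀ (j : Nat) (d : Int), d ≠ 0 →
    (bInner rest j d).2 = 0 → j < (bInner rest j d).1 := by
  induction rest with
  | nil => intro j d hd hc; simp [bInner] at hc; omega
  | cons c rest' ih =>
    intro j d hd hc
    by_cases h1 : c = '[' <;> by_cases h2 : c = ']' <;>
      simp_all [bInner] <;>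
      exact lt_of_lt_of_le (by omega) (bInner_ge rest' (j + 1) _)

-- inside a group, A's buffered loop agrees with B's inner scan over the same suffix:
-- the completed group is the scanned characters short of the closing ']'
theorem inner_agree (rest : List Char) : ∀ (j : Nat) (d : Int), 0 < d →
    ∀ (groups : List String) (buf : List Char),
    aLoop rest groups buf d true =
      (if (bInner rest j d).2 = 0 then
        aLoop (rest.drop ((bInner rest j d).1 - j))
          (groups ++ [PySem.Str.strip (String.ofList
            (buf ++ rest.take ((bInner rest j d).1 - 1 - j)))]) [] 0 false
       else groups) := by
  induction rest with
  | nil =>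
    intro j d hd groups buf
    rw [bInner, if_neg (by simp; omega)]
    rfl
  | cons c rest' ih =>
    intro j d hd groups buf
    have hbi : bInner (c :: rest') j d
        = (if c = '[' then bInner rest' (j + 1) (d + 1)
           else if c = ']' then bInner rest' (j + 1) (d - 1)
           else bInner rest' (j + 1) d) := by
      simp [bInner, show d ≠ 0 by omega]
    by_cases h1 : c = '['
    · subst h1
      rw [hbi, if_pos rfl]
      have hstep : aLoop ('[' :: rest') groups buf d true
          = aLoop rest' groups (buf ++ ['[']) (d + 1) true := by
        simp [aLoop, show ¬d = 0 by omega]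
      rw [hstep, ih (j + 1) (d + 1) (by omega) groups (buf ++ ['['])]
      split
      · rename_i hz
        have hgt : j + 1 < (bInner rest' (j + 1) (d + 1)).1 :=
          bInner_gt rest' (j + 1) (d + 1) (by omega) hz
        rw [show (bInner rest' (j + 1) (d + 1)).1 - j
              = ((bInner rest' (j + 1) (d + 1)).1 - (j + 1)) + 1 by omega,
            show (bInner rest' (j + 1) (d + 1)).1 - 1 - j
              = ((bInner rest' (j + 1) (d + 1)).1 - 1 - (j + 1)) + 1 by omega,
            List.drop_succ_cons, List.take_succ_cons]
        simp
      · rfl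
    · by_cases h2 : c = ']'
      · subst h2
        rw [hbi, if_neg h1, if_pos rfl]
        by_cases hone : d = 1
        · subst hone
          have hb0 : bInner rest' (j + 1) (1 - 1 : Int) = (j + 1, 0) := by
            cases rest' <;> simp [bInner]
          rw [hb0]
          have hstep : aLoop (']' :: rest') groups buf 1 true
              = aLoop rest' (groups ++ [PySem.Str.strip (String.ofList buf)]) buf 0 false := by
            simp [aLoop]
          rw [hstep]
          simp [show j + 1 - j = 1 by omega]
          apply aLoop_buf_irrel
        · have hstep : aLoop (']' :: rest') groups buf d true
              = aLoop rest' groups (buf ++ [']']) (d - 1) true := by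
            simp [aLoop, show ¬d = 0 by omega, show ¬(d - 1 = 0) by omega]
          rw [hstep, ih (j + 1) (d - 1) (by omega) groups (buf ++ [']'])]
          split
          · rename_i hz
            have hgt : j + 1 < (bInner rest' (j + 1) (d - 1)).1 :=
              bInner_gt rest' (j + 1) (d - 1) (by omega) hz
            rw [show (bInner rest' (j + 1) (d - 1)).1 - j
                  = ((bInner rest' (j + 1) (d - 1)).1 - (j + 1)) + 1 by omega,
                show (bInner rest' (j + 1) (d - 1)).1 - 1 - j
                  = ((bInner rest' (j + 1) (d - 1)).1 - 1 - (j + 1)) + 1 by omega,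
                List.drop_succ_cons, List.take_succ_cons]
            simp
          · rfl
      · rw [hbi, if_neg h1, if_neg h2]
        have hstep : aLoop (c :: rest') groups buf d true
            = aLoop rest' groups (buf ++ [c]) d true := by
          simp [aLoop, h1, h2]
        rw [hstep, ih (j + 1) d (by omega) groups (buf ++ [c])]
        split
        · rename_i hz
          have hgt : j + 1 < (bInner rest' (j + 1) d).1 :=
            bInner_gt rest' (j + 1) d (by omega) hz
          rw [show (bInner rest' (j + 1) d).1 - j
                = ((bInner rest' (j + 1) d).1 - (j + 1)) + 1 by omega,
              show (bInner rest' (j + 1) d).1 - 1 - j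
                = ((bInner rest' (j + 1) d).1 - 1 - (j + 1)) + 1 by omega,
              List.drop_succ_cons, List.take_succ_cons]
          simp
        · rfl

theorem outer_agree (cs : List Char) : ∀ (fuel i : Nat), cs.length ≤ fuel + i →
    ∀ (groups : List String) (buf : List Char),
    aLoop (cs.drop i) groups buf 0 false = bOuter cs fuel i groups := by
  intro fuel
  induction fuel with
  | zero =>
    intro i hfi groups buf
    rw [List.drop_eq_nil_of_le (by omega)]
    rfl
  | succ fuel ih =>
    intro i hfi groups buf
    by_cases h : i < cs.length
    · have hdrop : cs.drop i = cs[i] :: cs.drop (i + 1) := List.drop_eq_getElem_cons h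
      by_cases hcb : cs[i] = '['
      · rw [hdrop, hcb]
        have hstep : aLoop ('[' :: cs.drop (i + 1)) groups buf 0 false
            = aLoop (cs.drop (i + 1)) groups [] 1 true := by simp [aLoop]
        rw [hstep, inner_agree (cs.drop (i + 1)) (i + 1) 1 (by omega) groups []]
        rw [bOuter]
        rw [dif_pos h, if_pos hcb]
        set p := bInner (cs.drop (i + 1)) (i + 1) 1 with hp
        split
        · rename_i hz
          have hgt : i + 1 < p.1 := bInner_gt (cs.drop (i + 1)) (i + 1) 1 (by omega) hz
          rw [if_pos hz]
          rw [List.drop_drop]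
          rw [show i + 1 + (p.1 - (i + 1)) = p.1 by omega]
          rw [← ih p.1 (by omega) _ []]
          have hslice : PySem.List.slice cs (some ((i : Int) + 1)) (some ((p.1 : Int) - 1))
              = (cs.drop (i + 1)).take (p.1 - 1 - (i + 1)) := by
            rw [show ((i : Int) + 1) = (((i + 1 : Nat) : Int)) by push_cast; ring,
                show (((p.1 : Int)) - 1) = (((p.1 - 1 : Nat)) : Int) by
                  push_cast [Nat.cast_sub (by omega : 1 ≤ p.1)]; ring]
            rw [PySem.List.slice_natCast]
          rw [hslice]
          simp
        · rename_i hz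
          rw [if_neg hz]
      · rw [hdrop]
        have hstep : aLoop (cs[i] :: cs.drop (i + 1)) groups buf 0 false
            = aLoop (cs.drop (i + 1)) groups buf 0 false := by
          by_cases h2 : cs[i] = ']' <;> simp [aLoop, hcb, h2]
        rw [hstep, ih (i + 1) (by omega) groups buf]
        rw [bOuter, dif_pos h, if_neg hcb]
    · rw [List.drop_eq_nil_of_le (by omega), bOuter, dif_neg h]
      rfl

-- ===== VERDICT (by name: the statement is the Claim_ definition above) =====
theorem extract_bracket_groups_py_spec : Claim_equal_extract_bracket_groups_py := by
  intro text _
  unfold Spec_extract_bracket_groups_py extract_bracket_groups_py extract_bracket_groups_py_alt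
  have := outer_agree (if text = "" then "" else text).toList
    (if text = "" then "" else text).toList.length 0 (by omega) [] []
  simpa using this
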